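-- pv_equiv track=rewrite | github.com/Njaaped/Advent-Of-Code-2023 | d14/d14p2.py | rollalldir
-- ===== SOURCE A (Python) =====
-- from collections import deque
--
-- def rollalldir(grid):
--
--     #north
--     for i in range(len(grid[0])):
--         dq = deque()
--         for j in range(len(grid)):
--             if grid[j][i] == ".":
--                 dq.append((j,i))
--
--             elif grid[j][i] == "O":
--                 if len(dq) > 0:
--
--                     newj,newi = dq.popleft()
--                     grid[newj][newi] = "O"
--
--                     grid[j][i] = "."
--                     dq.append((j,i))
--
--
--
--             elif grid[j][i] == "#":
--                 dq.clear()
--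
--
--     #west
--     for i in range(len(grid)):
--         dq = deque()
--         for j in range(len(grid[0])):
--             if grid[i][j] == ".":
--                 dq.append((i,j))
--
--             elif grid[i][j] == "O":
--                 if len(dq) > 0:
--
--                     newi,newj = dq.popleft()
--                     grid[newi][newj] = "O"
--
--                     grid[i][j] = "."
--                     dq.append((i,j))
--
--
--             elif grid[i][j] == "#":
--                 dq.clear()
--
--
--     #soutj
--     for i in range(len(grid[0])):
--         dq = deque()
--         for j in range(len(grid)-1,-1,-1):
--             if grid[j][i] == ".":
--                 dq.append((j,i))
--
--             elif grid[j][i] == "O":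
--                 if len(dq) > 0:
--
--                     newj,newi = dq.popleft()
--                     grid[newj][newi] = "O"
--
--                     grid[j][i] = "."
--                     dq.append((j,i))
--
--
--
--             elif grid[j][i] == "#":
--                 dq.clear()
--
--
--     # easy
--     for i in range(len(grid)):
--         dq = deque()
--         for j in range(len(grid[0])-1,-1,-1):
--             if grid[i][j] == ".":
--                 dq.append((i,j))
--
--             elif grid[i][j] == "O":
--                 if len(dq) > 0:
--
--                     newi,newj = dq.popleft()
--                     grid[newi][newj] = "O"
--
--                     grid[i][j] = "."
--                     dq.append((i,j))
--
--
--             elif grid[i][j] == "#":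
--                 dq.clear()
--
--     return grid
-- ===== SOURCE B (Python) =====
-- def rollalldir(grid):
--     # Mutates grid in place like the original; per-line segment packing.
--     h = len(grid)
--     w = len(grid[0])
--
--     def pack(cells):
--         out = list(cells)
--         idxs = []
--         count = 0
--         def flush():
--             nonlocal count
--             for k in range(len(idxs)):
--                 out[idxs[k]] = "O" if k < count else "."
--             idxs.clear()
--             count = 0
--         for p in range(len(cells)):
--             c = cells[p]
--             if c == "#":
--                 flush()
--             elif c == "." or c == "O":
--                 idxs.append(p)
--                 if c == "O":
--                     count += 1
--         flush()
--         return out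
--
--     def tilt_cols(rev):
--         for i in range(w):
--             col = [grid[j][i] for j in range(h)]
--             if rev:
--                 col.reverse()
--             col = pack(col)
--             if rev:
--                 col.reverse()
--             for j in range(h):
--                 grid[j][i] = col[j]
--
--     def tilt_rows(rev):
--         for i in range(h):
--             seg = grid[i][:w]
--             if rev:
--                 seg.reverse()
--             seg = pack(seg)
--             if rev:
--                 seg.reverse()
--             grid[i][:w] = seg
--
--     tilt_cols(False)
--     tilt_rows(False)
--     tilt_cols(True)
--     tilt_rows(True)
--     return grid
-- ===== Notes on version B (the rewrite author's own statement) =====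
-- stated objective: alternative
-- what changed: Replaces the deque-of-empty-cells in-place simulation with per-line segment packing: each row/column is extracted, each '#'-delimited segment's movable cells are counted and rewritten in one shot ('O's first, then '.'s), and the line is written back.
import Mathlib
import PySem

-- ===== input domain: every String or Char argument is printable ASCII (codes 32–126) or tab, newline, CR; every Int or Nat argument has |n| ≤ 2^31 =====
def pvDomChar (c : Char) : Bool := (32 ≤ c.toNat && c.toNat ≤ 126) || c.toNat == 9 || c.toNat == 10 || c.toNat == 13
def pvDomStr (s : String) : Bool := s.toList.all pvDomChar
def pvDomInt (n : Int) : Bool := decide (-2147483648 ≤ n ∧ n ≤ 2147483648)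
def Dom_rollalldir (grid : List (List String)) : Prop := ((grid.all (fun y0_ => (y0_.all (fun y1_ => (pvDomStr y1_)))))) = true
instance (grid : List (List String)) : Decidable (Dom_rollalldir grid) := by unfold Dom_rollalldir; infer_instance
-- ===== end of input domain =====

-- B replaces the in-place deque-of-empty-cells simulation by per-line segment packing
-- (count the 'O's between '#'s and rewrite each segment in one shot); same cost, plainer
-- ("alternative"); both A and B mutate the Python argument in place, the theorems are
-- about the return value.


-- ===== PORT A =====
-- shared cell accessors (indices are in range on every input admitted by Pre_)
def pvCell (g : List (List String)) (j i : Nat) : String := (g.getD j []).getD i ""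

def pvSet (g : List (List String)) (j i : Nat) (v : String) : List (List String) :=
  g.set j ((g.getD j []).set i v)

-- the body of A's column-direction inner loop (grid, deque of empty cells)
def pvStepCol (i : Nat) (s : List (List String) × List (Nat × Nat)) (j : Nat) :
    List (List String) × List (Nat × Nat) :=
  let g := s.1
  let dq := s.2
  let c := pvCell g j i
  if c = "." then (g, dq ++ [(j, i)])
  else if c = "O" then
    match dq with
    | [] => (g, dq)
    | (nj, ni) :: rest => (pvSet (pvSet g nj ni "O") j i ".", rest ++ [(j, i)])
  else if c = "#" then (g, [])
  else (g, dq)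

-- the body of A's row-direction inner loop
def pvStepRow (i : Nat) (s : List (List String) × List (Nat × Nat)) (j : Nat) :
    List (List String) × List (Nat × Nat) :=
  let g := s.1
  let dq := s.2
  let c := pvCell g i j
  if c = "." then (g, dq ++ [(i, j)])
  else if c = "O" then
    match dq with
    | [] => (g, dq)
    | (ni, nj) :: rest => (pvSet (pvSet g ni nj "O") i j ".", rest ++ [(i, j)])
  else if c = "#" then (g, [])
  else (g, dq)

def rollalldir (grid : List (List String)) : List (List String) :=
  -- north
  let g1 := (List.range (grid.headD []).length).foldl
      (fun g i => ((List.range g.length).foldl (pvStepCol i) (g, [])).1) grid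
  -- west
  let g2 := (List.range g1.length).foldl
      (fun g i => ((List.range (g.headD []).length).foldl (pvStepRow i) (g, [])).1) g1
  -- south  (range(len(grid)-1,-1,-1))
  let g3 := (List.range (g2.headD []).length).foldl
      (fun g i => ((List.range g.length).reverse.foldl (pvStepCol i) (g, [])).1) g2
  -- east
  let g4 := (List.range g3.length).foldl
      (fun g i => ((List.range (g.headD []).length).reverse.foldl (pvStepRow i) (g, [])).1) g3
  g4

-- ===== PORT B =====
-- flush(): write 'O' to the first `count` collected movable slots, '.' to the rest
def pvFlush (out : List String) (idxs : List Nat) (count : Nat) : List String :=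
  (List.range idxs.length).foldl
    (fun o k => o.set (idxs.getD k 0) (if k < count then "O" else ".")) out

-- one step of pack's scan: state (out, idxs, count)
def pvPackStep (cells : List String) (s : List String × List Nat × Nat) (p : Nat) :
    List String × List Nat × Nat :=
  let c := cells.getD p ""
  if c = "#" then (pvFlush s.1 s.2.1 s.2.2, [], 0)
  else if c = "." ∨ c = "O" then
    (s.1, s.2.1 ++ [p], s.2.2 + (if c = "O" then 1 else 0))
  else s

def pvPack (cells : List String) : List String :=
  let s := (List.range cells.length).foldl (pvPackStep cells) (cells, [], 0)
  pvFlush s.1 s.2.1 s.2.2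

def pvGetCol (g : List (List String)) (i h : Nat) : List String :=
  (List.range h).map (fun j => pvCell g j i)

def pvWriteCol (g : List (List String)) (i h : Nat) (col : List String) : List (List String) :=
  (List.range h).foldl (fun g j => pvSet g j i (col.getD j "")) g

def rollalldir_alt (grid : List (List String)) : List (List String) :=
  let h := grid.length
  let w := (grid.headD []).length
  let tiltCols := fun (rev : Bool) (g : List (List String)) =>
    (List.range w).foldl (fun g i =>
      let col := pvGetCol g i h
      let col := if rev then col.reverse else col
      let col := pvPack col
      let col := if rev then col.reverse else col
      pvWriteCol g i h col) g
  let tiltRows := fun (rev : Bool) (g : List (List String)) =>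
    (List.range h).foldl (fun g i =>
      let row := g.getD i []
      let seg := row.take w
      let seg := if rev then seg.reverse else seg
      let seg := pvPack seg
      let seg := if rev then seg.reverse else seg
      g.set i (seg ++ row.drop w)) g
  tiltRows true (tiltCols true (tiltRows false (tiltCols false grid)))

-- ===== PRECONDITION & SPEC =====
-- Pre_ excludes exactly the inputs on which A raises IndexError: the empty grid
-- (len(grid[0])) and grids with a row shorter than row 0 (grid[j][i] out of range).
def Pre_rollalldir (grid : List (List String)) : Prop :=
  grid ≠ [] ∧ ∀ row ∈ grid, (grid.headD []).length ≤ row.length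

instance (grid : List (List String)) : Decidable (Pre_rollalldir grid) := by
  unfold Pre_rollalldir; infer_instance

def pvWitness_rollalldir : List (List String) :=
  [["O", ".", "#"], [".", "O", "."], ["#", "O", "O"]]

def Spec_rollalldir (grid : List (List String)) (out : List (List String)) : Prop := out = rollalldir_alt grid
instance (grid : List (List String)) (out : List (List String)) : Decidable (Spec_rollalldir grid out) := by unfold Spec_rollalldir; infer_instance

-- ===== CLAIM (what is proved, stated in full; the proofs are below) =====
def Claim_equal_rollalldir : Prop := ∀ (grid : List (List String)), Dom_rollalldir grid → Pre_rollalldir grid → Spec_rollalldir grid (rollalldir grid)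

-- ===== LEMMAS AND PROOFS =====

-- generic list helpers ------------------------------------------------------

theorem pvListExt {α : Type} (d : α) (a b : List α) (hl : a.length = b.length)
    (h : ∀ j, j < a.length → a.getD j d = b.getD j d) : a = b := by
  apply List.ext_getElem hl
  intro j h1 h2
  have := h j h1
  rwa [List.getD_eq_getElem _ _ h1, List.getD_eq_getElem _ _ h2] at this

theorem pvGetD_set_ne {α : Type} (l : List α) (q j : Nat) (v d : α) (h : q ≠ j) :
    (l.set q v).getD j d = l.getD j d := by
  by_cases hj : j < l.length
  · rw [List.getD_eq_getElem _ _ (by simpa using hj), List.getD_eq_getElem _ _ hj,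
      List.getElem_set_ne h]
  · rw [List.getD_eq_default _ _ (by simpa using not_lt.mp hj),
      List.getD_eq_default _ _ (not_lt.mp hj)]

theorem pvGetD_set_self {α : Type} (l : List α) (q : Nat) (v d : α) (h : q < l.length) :
    (l.set q v).getD q d = v := by
  rw [List.getD_eq_getElem _ _ (by simpa using h), List.getElem_set_self]

theorem pvSet_eq_self {α : Type} (l : List α) (n : Nat) (v d : α) (h : n < l.length)
    (hv : l.getD n d = v) : l.set n v = l := by
  apply pvListExt d _ _ (by simp)
  intro j hj
  rcases eq_or_ne n j with rfl | hne
  · rw [pvGetD_set_self _ _ _ _ h, hv]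
  · exact pvGetD_set_ne _ _ _ _ _ hne

-- the shared one-line machine: A's deque scan on a single line ---------------

def lstep (s : List String × List Nat) (j : Nat) : List String × List Nat :=
  let c := s.1.getD j ""
  if c = "." then (s.1, s.2 ++ [j])
  else if c = "O" then
    match s.2 with
    | [] => (s.1, s.2)
    | q :: rest => ((s.1.set q "O").set j ".", rest ++ [j])
  else if c = "#" then (s.1, [])
  else (s.1, s.2)

def lineRun (cells : List String) : List String :=
  ((List.range cells.length).foldl lstep (cells, [])).1

theorem lstep_fst_length (s : List String × List Nat) (j : Nat) :
    (lstep s j).1.length = s.1.length := by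
  unfold lstep
  dsimp only
  split_ifs with h1 h2 h3
  · rfl
  · cases s.2 with
    | nil => rfl
    | cons q rest => simp
  · rfl
  · rfl

theorem lstep_fold_length (js : List Nat) : ∀ (l : List String) (dq : List Nat),
    ((js.foldl lstep (l, dq)).1).length = l.length := by
  induction js with
  | nil => intro l dq; rfl
  | cons j js ih =>
    intro l dq
    have h := lstep_fst_length (l, dq) j
    calc ((js.foldl lstep (lstep (l, dq) j)).1).length
        = (lstep (l, dq) j).1.length := by
          rw [show lstep (l, dq) j = ((lstep (l, dq) j).1, (lstep (l, dq) j).2) from rfl]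
          exact ih _ _
      _ = l.length := h

theorem lstep_snd_mem (s : List String × List Nat) (j : Nat) (x : Nat)
    (hx : x ∈ (lstep s j).2) : x ∈ s.2 ∨ x = j := by
  obtain ⟨l, dq⟩ := s
  unfold lstep at hx
  dsimp only at hx
  split_ifs at hx with h1 h2 h3
  · simpa using hx
  · cases dq with
    | nil => exact Or.inl hx
    | cons q rest =>
      simp at hx
      rcases hx with hx | hx
      · exact Or.inl (by simp [hx])
      · exact Or.inr hx
  · simp at hx
  · exact Or.inl hx

-- flushR: structural form of pvFlush ----------------------------------------

def flushR : List String → List Nat → Nat → List String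
  | out, [], _ => out
  | out, q :: qs, c => flushR (out.set q (if 0 < c then "O" else ".")) qs (c - 1)

theorem flushR_length (qs : List Nat) : ∀ (out : List String) (c : Nat),
    (flushR out qs c).length = out.length := by
  induction qs with
  | nil => intro out c; rfl
  | cons q qs ih => intro out c; rw [flushR, ih]; simp

theorem flushR_getD_notMem (qs : List Nat) : ∀ (out : List String) (c j : Nat) (d : String),
    j ∉ qs → (flushR out qs c).getD j d = out.getD j d := by
  induction qs with
  | nil => intro out c j d _; rfl
  | cons q qs ih =>
    intro out c j d h
    simp at h
    rw [flushR, ih _ _ _ _ h.2, pvGetD_set_ne _ _ _ _ _ (Ne.symm h.1)]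

theorem pvFlush_eq_flushR (qs : List Nat) : ∀ (out : List String) (c : Nat),
    pvFlush out qs c = flushR out qs c := by
  induction qs with
  | nil => intro out c; rfl
  | cons q qs ih =>
    intro out c
    unfold pvFlush
    rw [show (q :: qs).length = qs.length + 1 from rfl, List.range_succ_eq_map,
      List.foldl_cons, List.foldl_map]
    rw [flushR, ← ih]
    unfold pvFlush
    congr 1
    funext o k
    show o.set ((q :: qs).getD (k + 1) 0) (if k + 1 < c then "O" else ".")
        = o.set (qs.getD k 0) (if k < c - 1 then "O" else ".")
    rw [List.getD_cons_succ]
    exact congrArg _ (if_congr (by omega) rfl rfl)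

theorem flushR_ge (qs : List Nat) : ∀ (out : List String) (c : Nat), qs.length ≤ c →
    flushR out qs c = flushR out qs qs.length := by
  induction qs with
  | nil => intro out c _; rfl
  | cons q qs ih =>
    intro out c h
    simp at h
    rw [flushR, flushR, if_pos (show 0 < c by omega), if_pos (show 0 < (q :: qs).length by simp)]
    simp only [List.length_cons, Nat.add_sub_cancel]
    exact ih _ _ (by omega)

theorem flushR_append (qs : List Nat) : ∀ (out : List String) (c p : Nat),
    flushR out (qs ++ [p]) c = (flushR out qs c).set p (if qs.length < c then "O" else ".") := by
  induction qs with
  | nil => intro out c p; rfl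
  | cons q qs ih =>
    intro out c p
    rw [List.cons_append, flushR, ih, flushR]
    exact congrArg _ (if_congr (by simp only [List.length_cons]; omega) rfl rfl)

theorem flushR_set_comm (qs : List Nat) : ∀ (out : List String) (c j : Nat) (v : String),
    j ∉ qs → flushR (out.set j v) qs c = (flushR out qs c).set j v := by
  induction qs with
  | nil => intro out c j v _; rfl
  | cons q qs ih =>
    intro out c j v h
    simp at h
    rw [flushR, flushR, List.set_comm _ _ h.1, ih _ _ _ _ h.2]

theorem flushR_succ (qs : List Nat) : ∀ (out : List String) (c q : Nat) (rest : List Nat),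
    qs.Nodup → qs.drop c = q :: rest →
    flushR out qs (c + 1) = (flushR out qs c).set q "O" := by
  induction qs with
  | nil => intro out c q rest _ hd; simp at hd
  | cons q0 qs ih =>
    intro out c q rest hnd hd
    have hnd' : qs.Nodup := (List.nodup_cons.mp hnd).2
    have hq0 : q0 ∉ qs := (List.nodup_cons.mp hnd).1
    cases c with
    | zero =>
      simp only [List.drop_zero, List.cons.injEq] at hd
      obtain ⟨rfl, rfl⟩ := hd
      have e1 : flushR out (q0 :: qs) 1 = flushR (out.set q0 "O") qs 0 := by
        rw [flushR]; norm_num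
      have e2 : flushR out (q0 :: qs) 0 = flushR (out.set q0 ".") qs 0 := by
        rw [flushR]; norm_num
      rw [e1, e2, flushR_set_comm _ _ _ _ _ hq0, flushR_set_comm _ _ _ _ _ hq0, List.set_set]
    | succ c' =>
      have hd' : qs.drop c' = q :: rest := by simpa using hd
      have e1 : flushR out (q0 :: qs) (c' + 1 + 1) = flushR (out.set q0 "O") qs (c' + 1) := by
        rw [flushR]; norm_num
      have e2 : flushR out (q0 :: qs) (c' + 1) = flushR (out.set q0 "O") qs c' := by
        rw [flushR]; norm_num
      rw [e1, e2]
      exact ih _ _ _ _ hnd' hd'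

-- the pack invariant: A's line scan is an incremental version of B's pack ----

theorem packInv (cells : List String) (p : Nat) (hp : p ≤ cells.length) :
    ((List.range p).foldl lstep (cells, [])).1
      = flushR ((List.range p).foldl (pvPackStep cells) (cells, [], 0)).1
          ((List.range p).foldl (pvPackStep cells) (cells, [], 0)).2.1
          ((List.range p).foldl (pvPackStep cells) (cells, [], 0)).2.2 ∧
    ((List.range p).foldl lstep (cells, [])).2
      = ((List.range p).foldl (pvPackStep cells) (cells, [], 0)).2.1.drop
          ((List.range p).foldl (pvPackStep cells) (cells, [], 0)).2.2 ∧
    ((List.range p).foldl (pvPackStep cells) (cells, [], 0)).2.2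
      ≤ ((List.range p).foldl (pvPackStep cells) (cells, [], 0)).2.1.length ∧
    (∀ q ∈ ((List.range p).foldl (pvPackStep cells) (cells, [], 0)).2.1, q < p) ∧
    ((List.range p).foldl (pvPackStep cells) (cells, [], 0)).2.1.Nodup ∧
    ((List.range p).foldl (pvPackStep cells) (cells, [], 0)).1.length = cells.length ∧
    (∀ j, p ≤ j → ((List.range p).foldl (pvPackStep cells) (cells, [], 0)).1.getD j ""
      = cells.getD j "") := by
  revert hp
  induction p with
  | zero => exact fun _ => ⟨rfl, rfl, by simp, by simp, by simp, rfl, fun j _ => rfl⟩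
  | succ p ih =>
    intro hp
    obtain ⟨ha, hb, hc, hd, he, hf, hg⟩ := ih (by omega)
    rw [List.range_succ]
    simp only [List.foldl_append, List.foldl_cons, List.foldl_nil]
    set s := (List.range p).foldl (pvPackStep cells) (cells, [], 0) with hs
    set t := (List.range p).foldl lstep (cells, []) with ht
    have hplen : p < cells.length := by omega
    have hpnot : p ∉ s.2.1 := fun hmem => lt_irrefl p (hd p hmem)
    have htlen : t.1.length = cells.length := by
      rw [ha, flushR_length, hf]
    have hread : t.1.getD p "" = cells.getD p "" := by
      rw [ha, flushR_getD_notMem _ _ _ _ _ hpnot]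
      exact hg p le_rfl
    by_cases h1 : cells.getD p "" = "."
    · -- '.' : queued on both sides
      have hlstep : lstep t p = (t.1, t.2 ++ [p]) := by
        unfold lstep; rw [hread, h1]; simp
      have hpstep : pvPackStep cells s p = (s.1, s.2.1 ++ [p], s.2.2) := by
        unfold pvPackStep; rw [h1]; simp
      rw [hlstep, hpstep]
      refine ⟨?_, ?_, ?_, ?_, ?_, ?_, ?_⟩
      · show t.1 = flushR s.1 (s.2.1 ++ [p]) s.2.2
        rw [flushR_append, if_neg (by omega), ← ha,
          pvSet_eq_self t.1 p "." "" (by omega) (by rw [hread, h1])]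
      · show t.2 ++ [p] = (s.2.1 ++ [p]).drop s.2.2
        rw [List.drop_append_of_le_length hc, hb]
      · simp; omega
      · intro q hq
        rcases List.mem_append.mp hq with hq | hq
        · exact Nat.lt_succ_of_lt (hd q hq)
        · simp at hq; omega
      · simp [List.nodup_append, he]
        intro a hmem rfl; exact hpnot hmem
      · exact hf
      · exact fun j hj => hg j (by omega)
    · by_cases h2 : cells.getD p "" = "O"
      · have hpstep : pvPackStep cells s p = (s.1, s.2.1 ++ [p], s.2.2 + 1) := by
          unfold pvPackStep; rw [h2]; simp
        cases hdq : s.2.1.drop s.2.2 with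
        | nil =>
          have hge : s.2.1.length ≤ s.2.2 := by
            by_contra hcon
            have := congrArg List.length hdq
            simp at this
            omega
          have hlstep : lstep t p = (t.1, t.2) := by
            unfold lstep; rw [hread, h2, hb, hdq]; simp
          rw [hlstep, hpstep]
          refine ⟨?_, ?_, ?_, ?_, ?_, ?_, ?_⟩
          · show t.1 = flushR s.1 (s.2.1 ++ [p]) (s.2.2 + 1)
            rw [flushR_append, if_pos (by omega), flushR_ge _ _ _ (by omega), ← flushR_ge _ _ _ hge, ← ha,
              pvSet_eq_self t.1 p "O" "" (by omega) (by rw [hread, h2])]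
          · show t.2 = (s.2.1 ++ [p]).drop (s.2.2 + 1)
            rw [hb, hdq, List.drop_eq_nil_of_le (by simp; omega)]
          · simp; omega
          · intro q hq
            rcases List.mem_append.mp hq with hq | hq
            · exact Nat.lt_succ_of_lt (hd q hq)
            · simp at hq; omega
          · simp [List.nodup_append, he]
            intro a hmem rfl; exact hpnot hmem
          · exact hf
          · exact fun j hj => hg j (by omega)
        | cons q rest =>
          have hlt : s.2.2 < s.2.1.length := by
            by_contra hcon
            rw [List.drop_eq_nil_of_le (by omega)] at hdq
            simp at hdq
          have ht2 : t.2 = q :: rest := by rw [hb, hdq]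
          have hlstep : lstep t p = ((t.1.set q "O").set p ".", rest ++ [p]) := by
            unfold lstep; rw [hread, h2, ht2]; simp
          rw [hlstep, hpstep]
          refine ⟨?_, ?_, ?_, ?_, ?_, ?_, ?_⟩
          · show (t.1.set q "O").set p "." = flushR s.1 (s.2.1 ++ [p]) (s.2.2 + 1)
            rw [flushR_append, if_neg (by omega), flushR_succ _ _ _ _ _ he hdq, ← ha]
          · show rest ++ [p] = (s.2.1 ++ [p]).drop (s.2.2 + 1)
            rw [List.drop_append_of_le_length (by omega), ← List.tail_drop, hdq, List.tail_cons]
          · simp; omega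
          · intro x hx
            rcases List.mem_append.mp hx with hx | hx
            · exact Nat.lt_succ_of_lt (hd x hx)
            · simp at hx; omega
          · simp [List.nodup_append, he]
            intro a hmem rfl; exact hpnot hmem
          · exact hf
          · exact fun j hj => hg j (by omega)
      · by_cases h3 : cells.getD p "" = "#"
        · have hlstep : lstep t p = (t.1, []) := by
            unfold lstep; rw [hread, h3]; simp
          have hpstep : pvPackStep cells s p = (flushR s.1 s.2.1 s.2.2, [], 0) := by
            unfold pvPackStep; rw [h3, ← pvFlush_eq_flushR]; simp
          rw [hlstep, hpstep]
          refine ⟨ha, rfl, by simp, by simp, by simp, ?_, ?_⟩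
          · show (flushR s.1 s.2.1 s.2.2).length = cells.length
            rw [flushR_length, hf]
          · intro j hj
            show (flushR s.1 s.2.1 s.2.2).getD j "" = cells.getD j ""
            rw [flushR_getD_notMem _ _ _ _ _ (fun hmem => by have := hd _ hmem; omega)]
            exact hg j (by omega)
        · have hlstep : lstep t p = (t.1, t.2) := by
            unfold lstep; rw [hread, if_neg h1, if_neg h2, if_neg h3]
          have hpstep : pvPackStep cells s p = s := by
            unfold pvPackStep
            rw [if_neg h3, if_neg (show ¬(cells.getD p "" = "." ∨ cells.getD p "" = "O") from
              fun h => h.elim h1 h2)]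
          rw [hlstep, hpstep]
          exact ⟨ha, hb, hc, fun q hq => Nat.lt_succ_of_lt (hd q hq), he, hf,
            fun j hj => hg j (by omega)⟩

-- reversal: running the scan backwards is the forward scan on the reversed line

theorem pvGetD_reverse {α : Type} (l : List α) (j : Nat) (d : α) (hj : j < l.length) :
    l.reverse.getD (l.length - 1 - j) d = l.getD j d := by
  rw [List.getD_eq_getElem _ _ (by simp; omega), List.getD_eq_getElem _ _ hj]
  rw [List.getElem_reverse]
  congr 1
  omega

theorem pvSet_reverse {α : Type} (l : List α) (m : Nat) (v : α) (hm : m < l.length) :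
    (l.set m v).reverse = l.reverse.set (l.length - 1 - m) v := by
  apply List.ext_getElem (by simp)
  intro i h1 h2
  have hi : i < l.length := by simpa using h1
  simp only [List.getElem_reverse, List.length_set, List.getElem_set]
  split_ifs with e1 e2 e3
  · rfl
  · omega
  · omega
  · rfl

theorem lstep_rev_step (n : Nat) (l : List String) (dq : List Nat) (j : Nat)
    (hl : l.length = n) (hj : j < n) (hdq : ∀ x ∈ dq, x < n) :
    lstep (l.reverse, dq.map (fun x => n - 1 - x)) (n - 1 - j)
      = ((lstep (l, dq) j).1.reverse, (lstep (l, dq) j).2.map (fun x => n - 1 - x)) := by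
  have hread : l.reverse.getD (n - 1 - j) "" = l.getD j "" := by
    rw [← hl]; exact pvGetD_reverse l j "" (hl ▸ hj)
  by_cases h1 : l.getD j "" = "."
  · unfold lstep
    rw [hread, h1]
    simp
  · by_cases h2 : l.getD j "" = "O"
    · cases dq with
      | nil =>
        unfold lstep
        rw [hread, h2]
        simp
      | cons q rest =>
        have hq : q < n := hdq q (by simp)
        have e : ((l.set q "O").set j ".").reverse
            = (l.reverse.set (n - 1 - q) "O").set (n - 1 - j) "." := by
          rw [pvSet_reverse (l.set q "O") j "." (by rw [List.length_set, hl]; exact hj),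
            pvSet_reverse l q "O" (by rw [hl]; exact hq)]
          rw [List.length_set, hl]
        unfold lstep
        rw [hread, h2]
        simp only [List.map_cons]
        simp [e]
    · by_cases h3 : l.getD j "" = "#"
      · unfold lstep
        rw [hread, h3]
        simp
      · have hR : lstep (l, dq) j = (l, dq) := by
          unfold lstep; dsimp only; rw [if_neg h1, if_neg h2, if_neg h3]
        have hL : lstep (l.reverse, dq.map (fun x => n - 1 - x)) (n - 1 - j)
            = (l.reverse, dq.map (fun x => n - 1 - x)) := by
          unfold lstep; dsimp only; rw [hread, if_neg h1, if_neg h2, if_neg h3]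
        rw [hL, hR]

theorem lstep_rev_fold (n : Nat) (js : List Nat) : ∀ (l : List String) (dq : List Nat),
    l.length = n → (∀ j ∈ js, j < n) → (∀ x ∈ dq, x < n) →
    (js.foldl lstep (l, dq)).1
        = (((js.map (fun j => n - 1 - j)).foldl lstep
            (l.reverse, dq.map (fun x => n - 1 - x))).1).reverse ∧
    ((js.foldl lstep (l, dq)).2).map (fun x => n - 1 - x)
        = ((js.map (fun j => n - 1 - j)).foldl lstep
            (l.reverse, dq.map (fun x => n - 1 - x))).2 := by
  induction js with
  | nil => intro l dq hl _ _; exact ⟨(List.reverse_reverse l).symm, rfl⟩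
  | cons j js ih =>
    intro l dq hl hjs hdq
    have hj : j < n := hjs j (by simp)
    have hstep := lstep_rev_step n l dq j hl hj hdq
    simp only [List.map_cons, List.foldl_cons]
    rw [hstep]
    have hl' : (lstep (l, dq) j).1.length = n := by rw [lstep_fst_length]; exact hl
    have hdq' : ∀ x ∈ (lstep (l, dq) j).2, x < n := by
      intro x hx
      rcases lstep_snd_mem _ _ _ hx with h | h
      · exact hdq x h
      · omega
    have := ih (lstep (l, dq) j).1 (lstep (l, dq) j).2 hl' (fun a ha => hjs a (by simp [ha])) hdq'
    rw [show ((lstep (l, dq) j).1, (lstep (l, dq) j).2) = lstep (l, dq) j from rfl] at this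
    exact this

theorem pvRevRangeMap (n : Nat) :
    (List.range n).reverse.map (fun j => n - 1 - j) = List.range n := by
  apply List.ext_getElem (by simp)
  intro i h1 h2
  have hi : i < n := by simpa using h2
  rw [List.getElem_map, List.getElem_reverse, List.getElem_range, List.getElem_range]
  simp only [List.length_range]
  omega

theorem lineRun_rev (l : List String) :
    ((List.range l.length).reverse.foldl lstep (l, [])).1 = (lineRun l.reverse).reverse := by
  have h := (lstep_rev_fold l.length (List.range l.length).reverse l [] rfl
    (fun j hj => by simp at hj; omega) (by simp)).1
  rw [pvRevRangeMap] at h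
  rw [h]
  unfold lineRun
  rw [List.length_reverse]
  rfl

theorem lineRun_eq_pack (cells : List String) : lineRun cells = pvPack cells := by
  have h := packInv cells cells.length le_rfl
  unfold lineRun pvPack
  rw [h.1, pvFlush_eq_flushR]

-- row passes: A's in-place scan of row i is the line machine on that row -----

theorem pvSet_row (g : List (List String)) (i : Nat) (line tail : List String)
    (q : Nat) (v : String) (hi : i < g.length) (hq : q < line.length) :
    pvSet (g.set i (line ++ tail)) i q v = g.set i (line.set q v ++ tail) := by
  unfold pvSet
  rw [pvGetD_set_self g i _ [] hi, List.set_set, List.set_append_left _ _ hq]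

theorem pvStepRow_sim (i : Nat) (g : List (List String)) (tail line : List String)
    (dq : List Nat) (j : Nat) (hi : i < g.length) (hj : j < line.length)
    (hdq : ∀ x ∈ dq, x < line.length) :
    pvStepRow i (g.set i (line ++ tail), dq.map (fun x => (i, x))) j
      = (g.set i ((lstep (line, dq) j).1 ++ tail),
         ((lstep (line, dq) j).2).map (fun x => (i, x))) := by
  have hread : pvCell (g.set i (line ++ tail)) i j = line.getD j "" := by
    unfold pvCell
    rw [pvGetD_set_self g i _ [] hi, List.getD_append _ _ _ _ hj]
  by_cases h1 : line.getD j "" = "."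
  · have hR : lstep (line, dq) j = (line, dq ++ [j]) := by
      unfold lstep; dsimp only; rw [h1]; simp
    have hL : pvStepRow i (g.set i (line ++ tail), dq.map (fun x => (i, x))) j
        = (g.set i (line ++ tail), dq.map (fun x => (i, x)) ++ [(i, j)]) := by
      unfold pvStepRow; dsimp only; rw [hread, h1]; simp
    rw [hL, hR]; simp
  · by_cases h2 : line.getD j "" = "O"
    · cases dq with
      | nil =>
        have hR : lstep (line, ([] : List Nat)) j = (line, []) := by
          unfold lstep; dsimp only; rw [h2]; simp
        have hL : pvStepRow i (g.set i (line ++ tail), ([] : List (Nat × Nat))) j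
            = (g.set i (line ++ tail), []) := by
          unfold pvStepRow; dsimp only; rw [hread, h2]; simp
        simp only [List.map_nil]
        rw [hL, hR]
        simp
      | cons q rest =>
        have hq : q < line.length := hdq q (by simp)
        have hR : lstep (line, q :: rest) j = ((line.set q "O").set j ".", rest ++ [j]) := by
          unfold lstep; dsimp only; rw [h2]; simp
        have hL : pvStepRow i (g.set i (line ++ tail), (q :: rest).map (fun x => (i, x))) j
            = (pvSet (pvSet (g.set i (line ++ tail)) i q "O") i j ".",
               rest.map (fun x => (i, x)) ++ [(i, j)]) := by
          unfold pvStepRow; dsimp only; rw [hread, h2]; simp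
        rw [hL, hR]
        rw [pvSet_row g i line tail q "O" hi hq,
          pvSet_row g i (line.set q "O") tail j "." hi (by rw [List.length_set]; exact hj)]
        simp
    · by_cases h3 : line.getD j "" = "#"
      · have hR : lstep (line, dq) j = (line, []) := by
          unfold lstep; dsimp only; rw [h3]; simp
        have hL : pvStepRow i (g.set i (line ++ tail), dq.map (fun x => (i, x))) j
            = (g.set i (line ++ tail), []) := by
          unfold pvStepRow; dsimp only; rw [hread, h3]; simp
        rw [hL, hR]; simp
      · have hR : lstep (line, dq) j = (line, dq) := by
          unfold lstep; dsimp only; rw [if_neg h1, if_neg h2, if_neg h3]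
        have hL : pvStepRow i (g.set i (line ++ tail), dq.map (fun x => (i, x))) j
            = (g.set i (line ++ tail), dq.map (fun x => (i, x))) := by
          unfold pvStepRow; dsimp only
          rw [hread, if_neg h1, if_neg h2, if_neg h3]
        rw [hL, hR]

theorem simRow (i : Nat) (g : List (List String)) (tail : List String)
    (hi : i < g.length) (js : List Nat) :
    ∀ (line : List String) (dq : List Nat),
    (∀ j ∈ js, j < line.length) → (∀ x ∈ dq, x < line.length) →
    js.foldl (pvStepRow i) (g.set i (line ++ tail), dq.map (fun x => (i, x)))
      = (g.set i ((js.foldl lstep (line, dq)).1 ++ tail),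
         ((js.foldl lstep (line, dq)).2).map (fun x => (i, x))) := by
  induction js with
  | nil => intro line dq _ _; rfl
  | cons j js ih =>
    intro line dq hjs hdq
    have hj : j < line.length := hjs j (by simp)
    simp only [List.foldl_cons]
    rw [pvStepRow_sim i g tail line dq j hi hj hdq]
    have hlen : (lstep (line, dq) j).1.length = line.length := lstep_fst_length _ _
    have hdq' : ∀ x ∈ (lstep (line, dq) j).2, x < (lstep (line, dq) j).1.length := by
      intro x hx
      rw [hlen]
      rcases lstep_snd_mem _ _ _ hx with h | h
      · exact hdq x h
      · omega
    have := ih (lstep (line, dq) j).1 (lstep (line, dq) j).2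
      (fun a ha => by rw [hlen]; exact hjs a (by simp [ha])) hdq'
    rw [show ((lstep (line, dq) j).1, (lstep (line, dq) j).2) = lstep (line, dq) j from rfl]
      at this
    exact this

theorem rowPass (g : List (List String)) (i w : Nat) (js : List Nat)
    (hi : i < g.length) (hw : w ≤ (g.getD i []).length) (hjs : ∀ j ∈ js, j < w) :
    (js.foldl (pvStepRow i) (g, [])).1
      = g.set i ((js.foldl lstep ((g.getD i []).take w, [])).1 ++ (g.getD i []).drop w) := by
  have hlen : ((g.getD i []).take w).length = w := by
    rw [List.length_take]; omega
  have h0 : g.set i ((g.getD i []).take w ++ (g.getD i []).drop w) = g := by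
    rw [List.take_append_drop]
    exact pvSet_eq_self g i _ [] hi rfl
  have h := simRow i g ((g.getD i []).drop w) hi js ((g.getD i []).take w) []
    (by rw [hlen]; exact hjs) (by simp)
  rw [show (([] : List Nat).map (fun x => (i, x))) = ([] : List (Nat × Nat)) from rfl, h0] at h
  rw [h]

-- column passes: A's in-place scan of column i is the line machine on that column

def putCol : List (List String) → Nat → List String → List (List String)
  | [], _, _ => []
  | r :: g, _, [] => r :: g
  | r :: g, i, c :: cs => r.set i c :: putCol g i cs

theorem putCol_nil_line (g : List (List String)) (i : Nat) : putCol g i [] = g := by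
  cases g <;> rfl

theorem putCol_length (g : List (List String)) (i : Nat) : ∀ (line : List String),
    (putCol g i line).length = g.length := by
  induction g with
  | nil => intro line; cases line <;> rfl
  | cons r g ih =>
    intro line
    cases line with
    | nil => rfl
    | cons c cs => simp [putCol, ih]

theorem pvSet_cons_succ (a : List String) (l : List (List String)) (q i : Nat) (v : String) :
    pvSet (a :: l) (q + 1) i v = a :: pvSet l q i v := rfl

theorem pvCell_putCol (i : Nat) (g : List (List String)) : ∀ (line : List String) (j : Nat),
    j < line.length → line.length ≤ g.length → i < (g.getD j []).length →
    pvCell (putCol g i line) j i = line.getD j "" := by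
  induction g with
  | nil => intro line j hj hlen _; rw [List.length_nil] at hlen; omega
  | cons r g ih =>
    intro line j hj hlen hi
    cases line with
    | nil => simp at hj
    | cons c cs =>
      cases j with
      | zero =>
        show pvCell (r.set i c :: putCol g i cs) 0 i = c
        unfold pvCell
        rw [List.getD_cons_zero]
        exact pvGetD_set_self r i c "" (by simpa using hi)
      | succ j =>
        show pvCell (r.set i c :: putCol g i cs) (j + 1) i = cs.getD j ""
        have : pvCell (r.set i c :: putCol g i cs) (j + 1) i = pvCell (putCol g i cs) j i := rfl
        rw [this]
        exact ih cs j (by simpa using hj) (by simpa using hlen) hi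

theorem pvSet_putCol (i : Nat) (v : String) (g : List (List String)) :
    ∀ (line : List String) (q : Nat), q < line.length → line.length ≤ g.length →
    pvSet (putCol g i line) q i v = putCol g i (line.set q v) := by
  induction g with
  | nil => intro line q hq hlen; rw [List.length_nil] at hlen; omega
  | cons r g ih =>
    intro line q hq hlen
    cases line with
    | nil => simp at hq
    | cons c cs =>
      cases q with
      | zero =>
        show pvSet (r.set i c :: putCol g i cs) 0 i v = r.set i v :: putCol g i cs
        unfold pvSet
        rw [List.getD_cons_zero, List.set_set]
        rfl
      | succ q =>
        show pvSet (r.set i c :: putCol g i cs) (q + 1) i v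
            = r.set i c :: putCol g i (cs.set q v)
        rw [pvSet_cons_succ, ih cs q (by simpa using hq) (by simpa using hlen)]

theorem pvStepCol_sim (i : Nat) (g : List (List String)) (line : List String)
    (dq : List Nat) (j : Nat) (hlen : line.length ≤ g.length) (hj : j < line.length)
    (hdq : ∀ x ∈ dq, x < line.length) (hw : ∀ row ∈ g, i < row.length) :
    pvStepCol i (putCol g i line, dq.map (fun x => (x, i))) j
      = (putCol g i (lstep (line, dq) j).1,
         ((lstep (line, dq) j).2).map (fun x => (x, i))) := by
  have hjg : j < g.length := lt_of_lt_of_le hj hlen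
  have hrow : ∀ k, k < g.length → i < (g.getD k []).length := by
    intro k hk
    rw [List.getD_eq_getElem _ _ hk]
    exact hw _ (List.getElem_mem hk)
  have hread : pvCell (putCol g i line) j i = line.getD j "" :=
    pvCell_putCol i g line j hj hlen (hrow j hjg)
  by_cases h1 : line.getD j "" = "."
  · have hR : lstep (line, dq) j = (line, dq ++ [j]) := by
      unfold lstep; dsimp only; rw [h1]; simp
    have hL : pvStepCol i (putCol g i line, dq.map (fun x => (x, i))) j
        = (putCol g i line, dq.map (fun x => (x, i)) ++ [(j, i)]) := by
      unfold pvStepCol; dsimp only; rw [hread, h1]; simp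
    rw [hL, hR]; simp
  · by_cases h2 : line.getD j "" = "O"
    · cases dq with
      | nil =>
        have hR : lstep (line, ([] : List Nat)) j = (line, []) := by
          unfold lstep; dsimp only; rw [h2]; simp
        have hL : pvStepCol i (putCol g i line, ([] : List (Nat × Nat))) j
            = (putCol g i line, []) := by
          unfold pvStepCol; dsimp only; rw [hread, h2]; simp
        simp only [List.map_nil]
        rw [hL, hR]
        simp
      | cons q rest =>
        have hq : q < line.length := hdq q (by simp)
        have hR : lstep (line, q :: rest) j = ((line.set q "O").set j ".", rest ++ [j]) := by
          unfold lstep; dsimp only; rw [h2]; simp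
        have hL : pvStepCol i (putCol g i line, (q :: rest).map (fun x => (x, i))) j
            = (pvSet (pvSet (putCol g i line) q i "O") j i ".",
               rest.map (fun x => (x, i)) ++ [(j, i)]) := by
          unfold pvStepCol; dsimp only; rw [hread, h2]; simp
        rw [hL, hR]
        rw [pvSet_putCol i "O" g line q hq hlen,
          pvSet_putCol i "." g (line.set q "O") j (by rw [List.length_set]; exact hj)
            (by rw [List.length_set]; exact hlen)]
        simp
    · by_cases h3 : line.getD j "" = "#"
      · have hR : lstep (line, dq) j = (line, []) := by
          unfold lstep; dsimp only; rw [h3]; simp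
        have hL : pvStepCol i (putCol g i line, dq.map (fun x => (x, i))) j
            = (putCol g i line, []) := by
          unfold pvStepCol; dsimp only; rw [hread, h3]; simp
        rw [hL, hR]; simp
      · have hR : lstep (line, dq) j = (line, dq) := by
          unfold lstep; dsimp only; rw [if_neg h1, if_neg h2, if_neg h3]
        have hL : pvStepCol i (putCol g i line, dq.map (fun x => (x, i))) j
            = (putCol g i line, dq.map (fun x => (x, i))) := by
          unfold pvStepCol; dsimp only
          rw [hread, if_neg h1, if_neg h2, if_neg h3]
        rw [hL, hR]

theorem simCol (i : Nat) (g : List (List String)) (hw : ∀ row ∈ g, i < row.length)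
    (js : List Nat) : ∀ (line : List String) (dq : List Nat),
    line.length ≤ g.length → (∀ j ∈ js, j < line.length) → (∀ x ∈ dq, x < line.length) →
    js.foldl (pvStepCol i) (putCol g i line, dq.map (fun x => (x, i)))
      = (putCol g i (js.foldl lstep (line, dq)).1,
         ((js.foldl lstep (line, dq)).2).map (fun x => (x, i))) := by
  induction js with
  | nil => intro line dq _ _ _; rfl
  | cons j js ih =>
    intro line dq hlen hjs hdq
    have hj : j < line.length := hjs j (by simp)
    simp only [List.foldl_cons]
    rw [pvStepCol_sim i g line dq j hlen hj hdq hw]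
    have hlen' : (lstep (line, dq) j).1.length = line.length := lstep_fst_length _ _
    have hdq' : ∀ x ∈ (lstep (line, dq) j).2, x < (lstep (line, dq) j).1.length := by
      intro x hx
      rw [hlen']
      rcases lstep_snd_mem _ _ _ hx with h | h
      · exact hdq x h
      · omega
    have := ih (lstep (line, dq) j).1 (lstep (line, dq) j).2 (by rw [hlen']; exact hlen)
      (fun a ha => by rw [hlen']; exact hjs a (by simp [ha])) hdq'
    rw [show ((lstep (line, dq) j).1, (lstep (line, dq) j).2) = lstep (line, dq) j from rfl]
      at this
    exact this

theorem pvGetCol_length (g : List (List String)) (i h : Nat) :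
    (pvGetCol g i h).length = h := by simp [pvGetCol]

theorem pvGetCol_cons (r : List String) (g : List (List String)) (i h : Nat) :
    pvGetCol (r :: g) i (h + 1) = r.getD i "" :: pvGetCol g i h := by
  simp only [pvGetCol, List.range_succ_eq_map, List.map_cons, List.map_map]
  rfl

theorem putCol_getCol (i : Nat) (g : List (List String)) (hw : ∀ row ∈ g, i < row.length) :
    putCol g i (pvGetCol g i g.length) = g := by
  induction g with
  | nil => rfl
  | cons r g ih =>
    rw [show (r :: g).length = g.length + 1 from rfl, pvGetCol_cons]
    show r.set i (r.getD i "") :: putCol g i (pvGetCol g i g.length) = r :: g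
    rw [pvSet_eq_self r i _ "" (hw r (by simp)) rfl,
      ih (fun row hr => hw row (by simp [hr]))]

theorem colPass (g : List (List String)) (i : Nat) (js : List Nat)
    (hw : ∀ row ∈ g, i < row.length) (hjs : ∀ j ∈ js, j < g.length) :
    (js.foldl (pvStepCol i) (g, [])).1
      = putCol g i ((js.foldl lstep (pvGetCol g i g.length, [])).1) := by
  have hcl : (pvGetCol g i g.length).length = g.length := pvGetCol_length g i g.length
  have h := simCol i g hw js (pvGetCol g i g.length) [] (le_of_eq hcl)
    (by rw [hcl]; exact hjs) (by simp)
  rw [putCol_getCol i g hw] at h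
  rw [show (([] : List Nat).map (fun x => (x, i))) = ([] : List (Nat × Nat)) from rfl] at h
  rw [h]

theorem pvSet_putCol_snoc (i : Nat) (v : String) (g : List (List String)) :
    ∀ (line : List String), line.length < g.length →
    pvSet (putCol g i line) line.length i v = putCol g i (line ++ [v]) := by
  induction g with
  | nil => intro line h; rw [List.length_nil] at h; omega
  | cons r g ih =>
    intro line h
    cases line with
    | nil =>
      show pvSet (r :: g) 0 i v = putCol (r :: g) i [v]
      unfold pvSet
      rw [List.getD_cons_zero]
      show (r :: g).set 0 (r.set i v) = r.set i v :: putCol g i []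
      rw [putCol_nil_line, List.set_cons_zero]
    | cons c cs =>
      show pvSet (r.set i c :: putCol g i cs) (cs.length + 1) i v
          = r.set i c :: putCol g i (cs ++ [v])
      rw [pvSet_cons_succ, ih cs (by simpa using h)]

theorem pvWriteCol_eq_putCol (g : List (List String)) (i : Nat) (col : List String) :
    ∀ n, n ≤ col.length → n ≤ g.length → pvWriteCol g i n col = putCol g i (col.take n) := by
  intro n
  induction n with
  | zero => intro _ _; rw [List.take_zero, putCol_nil_line]; rfl
  | succ n ih =>
    intro hn hg
    unfold pvWriteCol
    rw [List.range_succ, List.foldl_append, List.foldl_cons, List.foldl_nil]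
    have : (List.range n).foldl (fun g j => pvSet g j i (col.getD j "")) g
        = putCol g i (col.take n) := ih (by omega) (by omega)
    rw [this]
    have htl : (col.take n).length = n := by rw [List.length_take]; omega
    rw [show pvSet (putCol g i (col.take n)) n i (col.getD n "")
        = pvSet (putCol g i (col.take n)) (col.take n).length i (col.getD n "") from by rw [htl],
      pvSet_putCol_snoc i _ g (col.take n) (by rw [htl]; omega)]
    congr 1
    rw [List.take_add_one]
    congr 1
    rw [List.getElem?_eq_getElem (by omega), List.getD_eq_getElem _ _ (by omega)]
    rfl

-- shape bookkeeping and the four passes -------------------------------------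

def ShapeP (g0 g : List (List String)) : Prop :=
  g.length = g0.length ∧ ∀ j : Nat, (g.getD j []).length = (g0.getD j []).length

theorem headD_eq_getD (l : List (List String)) : l.headD [] = l.getD 0 [] := by
  cases l <;> rfl

theorem shape_putCol (i : Nat) (g : List (List String)) : ∀ (line : List String),
    (putCol g i line).length = g.length ∧
    ∀ j : Nat, ((putCol g i line).getD j []).length = ((g.getD j []).length) := by
  induction g with
  | nil => intro line; cases line <;> exact ⟨rfl, fun _ => rfl⟩
  | cons r g ih =>
    intro line
    cases line with
    | nil => exact ⟨rfl, fun _ => rfl⟩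
    | cons c cs =>
      refine ⟨by simp [putCol, putCol_length], fun j => ?_⟩
      cases j with
      | zero => show (r.set i c).length = r.length; simp
      | succ j => exact (ih cs).2 j

theorem shape_setRow (g : List (List String)) (i : Nat) (newRow : List String)
    (hi : i < g.length) (hl : newRow.length = (g.getD i []).length) :
    ∀ j : Nat, ((g.set i newRow).getD j []).length = (g.getD j []).length := by
  intro j
  rcases eq_or_ne i j with rfl | hne
  · rw [pvGetD_set_self g i newRow [] hi, hl]
  · rw [pvGetD_set_ne g i j newRow [] hne]

theorem shape_facts (grid g : List (List String)) (hpre : Pre_rollalldir grid)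
    (hs : ShapeP grid g) :
    (g.headD []).length = (grid.headD []).length ∧
    ∀ row ∈ g, (grid.headD []).length ≤ row.length := by
  constructor
  · rw [headD_eq_getD, headD_eq_getD, hs.2 0]
  · intro row hr
    obtain ⟨j, hj, hrow⟩ := List.mem_iff_getElem.mp hr
    have h1 : row.length = (g.getD j []).length := by
      rw [List.getD_eq_getElem _ _ hj, hrow]
    have hjg : j < grid.length := by rw [← hs.1]; exact hj
    have h2 : (grid.getD j []).length = grid[j].length := by
      rw [List.getD_eq_getElem _ _ hjg]
    have h3 := hpre.2 grid[j] (List.getElem_mem hjg)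
    rw [h1, hs.2 j]
    omega

theorem pvPack_length (cells : List String) : (pvPack cells).length = cells.length := by
  rw [← lineRun_eq_pack]
  unfold lineRun
  rw [lstep_fold_length]

theorem pvFoldInv {β : Type} (P : List (List String) → Prop)
    (fA fB : List (List String) → β → List (List String)) :
    ∀ (is : List β) (g : List (List String)), P g →
    (∀ g' i, P g' → i ∈ is → fA g' i = fB g' i ∧ P (fB g' i)) →
    is.foldl fA g = is.foldl fB g ∧ P (is.foldl fB g) := by
  intro is
  induction is with
  | nil => intro g hg _; exact ⟨rfl, hg⟩
  | cons i is ih =>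
    intro g hg hstep
    obtain ⟨heq, hP⟩ := hstep g i hg (by simp)
    simp only [List.foldl_cons]
    rw [heq]
    exact ih (fB g i) hP (fun g' i' hg' hi' => hstep g' i' hg' (by simp [hi']))

theorem stepColF (grid : List (List String)) (hpre : Pre_rollalldir grid)
    (g : List (List String)) (i : Nat) (hs : ShapeP grid g)
    (hi : i < (grid.headD []).length) :
    ((List.range g.length).foldl (pvStepCol i) (g, [])).1
      = pvWriteCol g i grid.length (pvPack (pvGetCol g i grid.length)) ∧
    ShapeP grid (pvWriteCol g i grid.length (pvPack (pvGetCol g i grid.length))) := by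
  have hgl : g.length = grid.length := hs.1
  have hwrow : ∀ row ∈ g, i < row.length := fun row hr =>
    lt_of_lt_of_le hi ((shape_facts grid g hpre hs).2 row hr)
  have hcl : (pvGetCol g i g.length).length = g.length := pvGetCol_length g i g.length
  have hcp := colPass g i (List.range g.length) hwrow (fun j hj => by simpa using hj)
  have hlr : ((List.range g.length).foldl lstep (pvGetCol g i g.length, [])).1
      = lineRun (pvGetCol g i g.length) := by
    unfold lineRun; rw [hcl]
  rw [hlr, lineRun_eq_pack] at hcp
  have hpl : (pvPack (pvGetCol g i g.length)).length = g.length := by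
    rw [pvPack_length, hcl]
  have hwc : pvWriteCol g i g.length (pvPack (pvGetCol g i g.length))
      = putCol g i (pvPack (pvGetCol g i g.length)) := by
    have := pvWriteCol_eq_putCol g i (pvPack (pvGetCol g i g.length)) g.length
      (le_of_eq hpl.symm) le_rfl
    rwa [List.take_of_length_le (le_of_eq hpl)] at this
  constructor
  · rw [← hgl, hcp, hwc]
  · rw [← hgl, hwc]
    refine ⟨?_, fun j => ?_⟩
    · rw [(shape_putCol i g _).1, hgl]
    · rw [(shape_putCol i g _).2 j, hs.2 j]

theorem stepColT (grid : List (List String)) (hpre : Pre_rollalldir grid)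
    (g : List (List String)) (i : Nat) (hs : ShapeP grid g)
    (hi : i < (grid.headD []).length) :
    ((List.range g.length).reverse.foldl (pvStepCol i) (g, [])).1
      = pvWriteCol g i grid.length ((pvPack (pvGetCol g i grid.length).reverse).reverse) ∧
    ShapeP grid (pvWriteCol g i grid.length ((pvPack (pvGetCol g i grid.length).reverse).reverse)) := by
  have hgl : g.length = grid.length := hs.1
  have hwrow : ∀ row ∈ g, i < row.length := fun row hr =>
    lt_of_lt_of_le hi ((shape_facts grid g hpre hs).2 row hr)
  have hcl : (pvGetCol g i g.length).length = g.length := pvGetCol_length g i g.length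
  have hcp := colPass g i (List.range g.length).reverse hwrow (fun j hj => by simpa using hj)
  have hlr : ((List.range g.length).reverse.foldl lstep (pvGetCol g i g.length, [])).1
      = (lineRun (pvGetCol g i g.length).reverse).reverse := by
    rw [← lineRun_rev (pvGetCol g i g.length), hcl]
  rw [hlr, lineRun_eq_pack] at hcp
  have hpl : ((pvPack (pvGetCol g i g.length).reverse).reverse).length = g.length := by
    rw [List.length_reverse, pvPack_length, List.length_reverse, hcl]
  have hwc : pvWriteCol g i g.length ((pvPack (pvGetCol g i g.length).reverse).reverse)
      = putCol g i ((pvPack (pvGetCol g i g.length).reverse).reverse) := by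
    have := pvWriteCol_eq_putCol g i ((pvPack (pvGetCol g i g.length).reverse).reverse)
      g.length (le_of_eq hpl.symm) le_rfl
    rwa [List.take_of_length_le (le_of_eq hpl)] at this
  constructor
  · rw [← hgl, hcp, hwc]
  · rw [← hgl, hwc]
    refine ⟨?_, fun j => ?_⟩
    · rw [(shape_putCol i g _).1, hgl]
    · rw [(shape_putCol i g _).2 j, hs.2 j]

theorem stepRowF (grid : List (List String)) (hpre : Pre_rollalldir grid)
    (g : List (List String)) (i : Nat) (hs : ShapeP grid g) (hi : i < grid.length) :
    ((List.range (g.headD []).length).foldl (pvStepRow i) (g, [])).1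
      = g.set i (pvPack ((g.getD i []).take (grid.headD []).length)
          ++ (g.getD i []).drop (grid.headD []).length) ∧
    ShapeP grid (g.set i (pvPack ((g.getD i []).take (grid.headD []).length)
          ++ (g.getD i []).drop (grid.headD []).length)) := by
  have hig : i < g.length := by rw [hs.1]; exact hi
  have hhead : (g.headD []).length = (grid.headD []).length := (shape_facts grid g hpre hs).1
  have hwle : (grid.headD []).length ≤ (g.getD i []).length := by
    have := (shape_facts grid g hpre hs).2 (g.getD i [])
      (by rw [List.getD_eq_getElem _ _ hig]; exact List.getElem_mem hig)
    exact this
  have htk : ((g.getD i []).take (grid.headD []).length).length = (grid.headD []).length := by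
    rw [List.length_take]; omega
  have hrp := rowPass g i (grid.headD []).length (List.range (grid.headD []).length) hig hwle
    (fun j hj => by simpa using hj)
  have hlr : ((List.range (grid.headD []).length).foldl lstep
        (((g.getD i []).take (grid.headD []).length), [])).1
      = lineRun ((g.getD i []).take (grid.headD []).length) := by
    unfold lineRun; rw [htk]
  rw [hlr, lineRun_eq_pack] at hrp
  have hlen : (pvPack ((g.getD i []).take (grid.headD []).length)
        ++ (g.getD i []).drop (grid.headD []).length).length = (g.getD i []).length := by
    rw [List.length_append, pvPack_length, htk, List.length_drop]
    omega
  refine ⟨by rw [hhead]; exact hrp, ?_, fun j => ?_⟩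
  · rw [List.length_set, hs.1]
  · rw [shape_setRow g i _ hig hlen j, hs.2 j]

theorem stepRowT (grid : List (List String)) (hpre : Pre_rollalldir grid)
    (g : List (List String)) (i : Nat) (hs : ShapeP grid g) (hi : i < grid.length) :
    ((List.range (g.headD []).length).reverse.foldl (pvStepRow i) (g, [])).1
      = g.set i ((pvPack ((g.getD i []).take (grid.headD []).length).reverse).reverse
          ++ (g.getD i []).drop (grid.headD []).length) ∧
    ShapeP grid (g.set i ((pvPack ((g.getD i []).take (grid.headD []).length).reverse).reverse
          ++ (g.getD i []).drop (grid.headD []).length)) := by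
  have hig : i < g.length := by rw [hs.1]; exact hi
  have hhead : (g.headD []).length = (grid.headD []).length := (shape_facts grid g hpre hs).1
  have hwle : (grid.headD []).length ≤ (g.getD i []).length := by
    have := (shape_facts grid g hpre hs).2 (g.getD i [])
      (by rw [List.getD_eq_getElem _ _ hig]; exact List.getElem_mem hig)
    exact this
  have htk : ((g.getD i []).take (grid.headD []).length).length = (grid.headD []).length := by
    rw [List.length_take]; omega
  have hrp := rowPass g i (grid.headD []).length (List.range (grid.headD []).length).reverse
    hig hwle (fun j hj => by simpa using hj)
  have hlr : ((List.range (grid.headD []).length).reverse.foldl lstep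
        (((g.getD i []).take (grid.headD []).length), [])).1
      = (lineRun ((g.getD i []).take (grid.headD []).length).reverse).reverse := by
    rw [← lineRun_rev ((g.getD i []).take (grid.headD []).length), htk]
  rw [hlr, lineRun_eq_pack] at hrp
  have hlen : ((pvPack ((g.getD i []).take (grid.headD []).length).reverse).reverse
        ++ (g.getD i []).drop (grid.headD []).length).length = (g.getD i []).length := by
    rw [List.length_append, List.length_reverse, pvPack_length, List.length_reverse, htk,
      List.length_drop]
    omega
  refine ⟨by rw [hhead]; exact hrp, ?_, fun j => ?_⟩
  · rw [List.length_set, hs.1]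
  · rw [shape_setRow g i _ hig hlen j, hs.2 j]

-- the four passes, named, and the two ports as pass chains -------------------

def passColA (g : List (List String)) : List (List String) :=
  (List.range (g.headD []).length).foldl
    (fun g i => ((List.range g.length).foldl (pvStepCol i) (g, [])).1) g

def passRowA (g : List (List String)) : List (List String) :=
  (List.range g.length).foldl
    (fun g i => ((List.range (g.headD []).length).foldl (pvStepRow i) (g, [])).1) g

def passColRevA (g : List (List String)) : List (List String) :=
  (List.range (g.headD []).length).foldl
    (fun g i => ((List.range g.length).reverse.foldl (pvStepCol i) (g, [])).1) g

def passRowRevA (g : List (List String)) : List (List String) :=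
  (List.range g.length).foldl
    (fun g i => ((List.range (g.headD []).length).reverse.foldl (pvStepRow i) (g, [])).1) g

theorem rollA (grid : List (List String)) :
    rollalldir grid = passRowRevA (passColRevA (passRowA (passColA grid))) := rfl

def passColB (h w : Nat) (g : List (List String)) : List (List String) :=
  (List.range w).foldl (fun g i => pvWriteCol g i h (pvPack (pvGetCol g i h))) g

def passRowB (h w : Nat) (g : List (List String)) : List (List String) :=
  (List.range h).foldl
    (fun g i => g.set i (pvPack ((g.getD i []).take w) ++ (g.getD i []).drop w)) g

def passColRevB (h w : Nat) (g : List (List String)) : List (List String) :=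
  (List.range w).foldl
    (fun g i => pvWriteCol g i h ((pvPack (pvGetCol g i h).reverse).reverse)) g

def passRowRevB (h w : Nat) (g : List (List String)) : List (List String) :=
  (List.range h).foldl
    (fun g i => g.set i ((pvPack ((g.getD i []).take w).reverse).reverse
      ++ (g.getD i []).drop w)) g

theorem rollB (grid : List (List String)) :
    rollalldir_alt grid
      = passRowRevB grid.length (grid.headD []).length
          (passColRevB grid.length (grid.headD []).length
            (passRowB grid.length (grid.headD []).length
              (passColB grid.length (grid.headD []).length grid))) := rfl

theorem passCol_eq (grid : List (List String)) (hpre : Pre_rollalldir grid)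
    (g : List (List String)) (hs : ShapeP grid g) :
    passColA g = passColB grid.length (grid.headD []).length g ∧
    ShapeP grid (passColB grid.length (grid.headD []).length g) := by
  unfold passColA passColB
  rw [(shape_facts grid g hpre hs).1]
  exact pvFoldInv (ShapeP grid) _ _ (List.range (grid.headD []).length) g hs
    (fun g' i hg' hi => stepColF grid hpre g' i hg' (by simpa using hi))

theorem passRow_eq (grid : List (List String)) (hpre : Pre_rollalldir grid)
    (g : List (List String)) (hs : ShapeP grid g) :
    passRowA g = passRowB grid.length (grid.headD []).length g ∧
    ShapeP grid (passRowB grid.length (grid.headD []).length g) := by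
  unfold passRowA passRowB
  rw [hs.1]
  exact pvFoldInv (ShapeP grid) _ _ (List.range grid.length) g hs
    (fun g' i hg' hi => stepRowF grid hpre g' i hg' (by simpa using hi))

theorem passColRev_eq (grid : List (List String)) (hpre : Pre_rollalldir grid)
    (g : List (List String)) (hs : ShapeP grid g) :
    passColRevA g = passColRevB grid.length (grid.headD []).length g ∧
    ShapeP grid (passColRevB grid.length (grid.headD []).length g) := by
  unfold passColRevA passColRevB
  rw [(shape_facts grid g hpre hs).1]
  exact pvFoldInv (ShapeP grid) _ _ (List.range (grid.headD []).length) g hs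
    (fun g' i hg' hi => stepColT grid hpre g' i hg' (by simpa using hi))

theorem passRowRev_eq (grid : List (List String)) (hpre : Pre_rollalldir grid)
    (g : List (List String)) (hs : ShapeP grid g) :
    passRowRevA g = passRowRevB grid.length (grid.headD []).length g ∧
    ShapeP grid (passRowRevB grid.length (grid.headD []).length g) := by
  unfold passRowRevA passRowRevB
  rw [hs.1]
  exact pvFoldInv (ShapeP grid) _ _ (List.range grid.length) g hs
    (fun g' i hg' hi => stepRowT grid hpre g' i hg' (by simpa using hi))

-- ===== VERDICT (by name: the statement is the Claim_ definition above) =====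
theorem rollalldir_spec : Claim_equal_rollalldir := by
  intro grid _ hpre
  show rollalldir grid = rollalldir_alt grid
  rw [rollA, rollB]
  have s0 : ShapeP grid grid := ⟨rfl, fun _ => rfl⟩
  obtain ⟨e1, s1⟩ := passCol_eq grid hpre grid s0
  rw [e1]
  obtain ⟨e2, s2⟩ := passRow_eq grid hpre _ s1
  rw [e2]
  obtain ⟨e3, s3⟩ := passColRev_eq grid hpre _ s2
  rw [e3]
  obtain ⟨e4, _⟩ := passRowRev_eq grid hpre _ s3
  rw [e4]
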